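-- pv_equiv track=rewrite | github.com/bassyboi/Tornado-ground-scoring | src/run_pipeline.py | _resolve_palette
-- ===== SOURCE A (Python) =====
-- from typing import Any, Dict, Optional, Sequence
--
-- def _resolve_palette(raw: Any) -> list[str]:
--     default = ["#d0d0d0", "#9ecae1", "#6baed6", "#4292c6", "#2171b5", "#084594"]
--     if isinstance(raw, (list, tuple)):
--         palette = [str(color) for color in raw if color]
--     else:
--         palette = []
--     if not palette:
--         palette = default.copy()
--     while len(palette) < 6:
--         palette.append(default[len(palette)])
--     return palette[:6]
-- ===== SOURCE B (Python) =====
-- def _resolve_palette(raw):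
--     # Output-template approach: start from the full default palette and overwrite
--     # slots in place with supplied colors, in a single pass, stopping after 6.
--     result = ["#d0d0d0", "#9ecae1", "#6baed6", "#4292c6", "#2171b5", "#084594"]
--     if isinstance(raw, (list, tuple)):
--         i = 0
--         for color in raw:
--             if i == 6:
--                 break
--             if color:
--                 result[i] = str(color)
--                 i += 1
--     return result
-- ===== Notes on version B (the rewrite author's own statement) =====
-- stated objective: faster
-- what changed: Instead of A's input-driven pipeline (build a filtered list of all colors, fall back to the default when empty, pad with a while loop, slice to 6), B is output-driven: it starts from the six-slot default template and overwrites slots in place in a single pass, breaking out of the scan as soon as six colors are placed, with no intermediate list, no fallback branch, no pad loop and no slice.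
import Mathlib
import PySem

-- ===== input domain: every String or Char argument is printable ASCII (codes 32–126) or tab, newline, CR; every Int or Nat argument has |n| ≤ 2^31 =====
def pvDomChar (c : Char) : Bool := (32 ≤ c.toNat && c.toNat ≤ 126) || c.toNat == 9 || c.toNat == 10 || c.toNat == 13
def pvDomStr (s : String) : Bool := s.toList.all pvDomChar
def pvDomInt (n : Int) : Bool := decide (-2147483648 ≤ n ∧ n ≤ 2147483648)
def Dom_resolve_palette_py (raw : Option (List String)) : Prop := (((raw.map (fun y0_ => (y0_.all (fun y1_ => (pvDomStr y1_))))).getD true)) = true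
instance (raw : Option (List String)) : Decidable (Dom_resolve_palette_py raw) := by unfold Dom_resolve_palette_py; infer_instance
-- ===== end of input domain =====

-- B replaces A's filter/fallback/while-pad/slice pipeline by an output-template pass:
-- start from the six default slots, overwrite them in place with the supplied colors,
-- and break out of the scan once six are placed (objective: faster, as measured by the
-- timing run; A mutates only local lists, so return-value equivalence is full).

-- ===== PORT A =====
def pvDefaultPalette : List String :=
  ["#d0d0d0", "#9ecae1", "#6baed6", "#4292c6", "#2171b5", "#084594"]

-- the `while len(palette) < 6: palette.append(default[len(palette)])` loop; at most 6
-- iterations are ever taken, so fuel 6 is exact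
def pvPadLoop : Nat → List String → List String
  | 0, p => p
  | n + 1, p =>
      if p.length < 6 then pvPadLoop n (p ++ [pvDefaultPalette.getD p.length ""]) else p

def resolve_palette_py (raw : Option (List String)) : List String :=
  -- isinstance(raw, (list, tuple)) ↔ raw = some _; str(color) is the identity on strings;
  -- `if color` is the truthiness test color ≠ ""
  let palette : List String :=
    match raw with
    | some xs => xs.filter (fun c => c ≠ "")
    | none => []
  let palette := if palette = [] then pvDefaultPalette else palette
  let palette := pvPadLoop 6 palette
  PySem.List.slice palette none (some 6)

-- ===== PORT B =====
-- the `for color in raw` loop of Source B: result slots are overwritten via List.set,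
-- i counts how many slots were filled, `if i == 6: break` returns early
def pvFillLoop : List String → Nat → List String → List String
  | res, _, [] => res
  | res, i, c :: rest =>
      if i = 6 then res
      else if c ≠ "" then pvFillLoop (res.set i c) (i + 1) rest
      else pvFillLoop res i rest

def resolve_palette_py_alt (raw : Option (List String)) : List String :=
  let result := ["#d0d0d0", "#9ecae1", "#6baed6", "#4292c6", "#2171b5", "#084594"]
  match raw with
  | some xs => pvFillLoop result 0 xs
  | none => result

-- ===== PRECONDITION & SPEC =====
def Spec_resolve_palette_py (raw : Option (List String)) (out : List String) : Prop := out = resolve_palette_py_alt raw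
instance (raw : Option (List String)) (out : List String) : Decidable (Spec_resolve_palette_py raw out) := by unfold Spec_resolve_palette_py; infer_instance

-- ===== CLAIM (what is proved, stated in full; the proofs are below) =====
def Claim_equal_resolve_palette_py : Prop := ∀ (raw : Option (List String)), Dom_resolve_palette_py raw → Spec_resolve_palette_py raw (resolve_palette_py raw)

-- ===== LEMMAS AND PROOFS =====

-- the pad loop is a no-op once the list already has ≥ 6 entries
theorem pv_padLoop_of_full (n : Nat) (p : List String) (h : ¬ p.length < 6) :
    pvPadLoop n p = p := by
  cases n with
  | zero => rfl
  | succ m => simp [pvPadLoop, h]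

-- A's pipeline, in closed form over the filtered list
theorem pv_A_closed (p : List String) :
    PySem.List.slice (pvPadLoop 6 (if p = [] then pvDefaultPalette else p)) none (some 6)
      = p.take 6 ++ pvDefaultPalette.drop (min 6 p.length) := by
  match p with
  | [] => decide
  | [a] => simp [pvPadLoop, pvDefaultPalette, PySem.List.slice, PySem.List.clampIdx]
  | [a, b] => simp [pvPadLoop, pvDefaultPalette, PySem.List.slice, PySem.List.clampIdx]
  | [a, b, c] => simp [pvPadLoop, pvDefaultPalette, PySem.List.slice, PySem.List.clampIdx]
  | [a, b, c, d] => simp [pvPadLoop, pvDefaultPalette, PySem.List.slice, PySem.List.clampIdx]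
  | [a, b, c, d, e] => simp [pvPadLoop, pvDefaultPalette, PySem.List.slice, PySem.List.clampIdx]
  | a :: b :: c :: d :: e :: f :: rest =>
    rw [pv_padLoop_of_full 6 _ (by simp)]
    simp [pvDefaultPalette, PySem.List.slice, PySem.List.clampIdx, List.take_succ_cons]

-- B's fill loop, in closed form: it overwrites the segment [i, i + k) of res with the
-- first k nonempty colors of xs, where k = min (6 - i) (number of nonempty colors)
theorem pv_fillLoop_closed (xs : List String) (res : List String) (i : Nat)
    (hi : i ≤ 6) (hlen : res.length = 6) :
    pvFillLoop res i xs
      = res.take i ++ (xs.filter (fun c => c ≠ "")).take (6 - i)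
          ++ res.drop (i + min (6 - i) (xs.filter (fun c => c ≠ "")).length) := by
  induction xs generalizing res i with
  | nil => simp [pvFillLoop]
  | cons c rest ih =>
    by_cases h6 : i = 6
    · subst h6
      simp [pvFillLoop, List.take_of_length_le (le_of_eq hlen),
        List.drop_of_length_le (le_of_eq hlen)]
    · have hi' : i < 6 := lt_of_le_of_ne hi h6
      by_cases hc : c = ""
      · simp [pvFillLoop, h6, hc, ih res i hi hlen]
      · have hset : (res.set i c).length = 6 := by simp [hlen]
        have hilt : i < res.length := by omega
        rw [pvFillLoop, if_neg h6, if_pos (by simpa using hc),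
          ih (res.set i c) (i + 1) (by omega) hset]
        have hsplit : res.set i c = res.take i ++ c :: res.drop (i + 1) := by
          rw [List.set_eq_take_append_cons_drop, if_pos hilt]
        rw [hsplit]
        have htk : (res.take i).length = i := by simp [hlen]; omega
        have hfilter : (c :: rest).filter (fun c => c ≠ "") =
            c :: rest.filter (fun c => c ≠ "") := by simp [hc]
        rw [hfilter]
        have h1 : (res.take i ++ c :: res.drop (i + 1)).take (i + 1)
            = res.take i ++ [c] := by
          rw [List.take_append, htk]
          simp
        have h2 : ∀ j, (res.take i ++ c :: res.drop (i + 1)).drop (i + 1 + j)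
            = res.drop (i + 1 + j) := by
          intro j
          rw [List.drop_append, htk]
          have e1 : (res.take i).drop (i + 1 + j) = [] :=
            List.drop_eq_nil_of_le (by simp [hlen]; omega)
          have e2 : i + 1 + j - i = j + 1 := by omega
          rw [e1, e2, List.nil_append, List.drop_succ_cons, List.drop_drop]
        rw [h1, h2]
        have harith : i + 1 + min (6 - (i + 1)) (rest.filter (fun c => c ≠ "")).length
            = i + min (6 - i) ((rest.filter (fun c => c ≠ "")).length + 1) := by omega
        have htake : (c :: rest.filter (fun c => c ≠ "")).take (6 - i)
            = c :: (rest.filter (fun c => c ≠ "")).take (6 - (i + 1)) := by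
          have : 6 - i = (6 - (i + 1)) + 1 := by omega
          rw [this]; rfl
        rw [htake, List.length_cons, ← harith]
        simp

-- ===== VERDICT (by name: the statement is the Claim_ definition above) =====
theorem resolve_palette_py_spec : Claim_equal_resolve_palette_py := by
  intro raw _
  unfold Spec_resolve_palette_py resolve_palette_py resolve_palette_py_alt
  cases raw with
  | none => decide
  | some xs =>
    dsimp only
    show _ = pvFillLoop pvDefaultPalette 0 xs
    rw [pv_A_closed, pv_fillLoop_closed xs pvDefaultPalette 0 (by omega) (by decide)]
    simp [pvDefaultPalette]
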